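-- pv_equiv track=rewrite | github.com/matijapretnar/uvod-v-programiranje | odlozisce/06-slovarji-in-mnozice/prestej_cikle.py | v_seznamu_seznamov_se_vsak_element_pojavi_najvec_trikrat
-- ===== SOURCE A (Python) =====
-- def v_seznamu_seznamov_se_vsak_element_pojavi_najvec_trikrat(cikli):
--     ze_videni = set()
--     for cikel in cikli:
--         for element in cikel:
--             if element <= 0:
--                 return False
--             elif element in ze_videni:
--                 return False
--             else:
--                 ze_videni.add(element)
--     return True
-- ===== SOURCE B (Python) =====
-- def v_seznamu_seznamov_se_vsak_element_pojavi_najvec_trikrat(cikli):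
--     elements = [e for cikel in cikli for e in cikel]
--     return all(e > 0 for e in elements) and len(set(elements)) == len(elements)
-- ===== Notes on version B (the rewrite author's own statement) =====
-- stated objective: simpler
-- what changed: Replaces the interleaved early-return nested loop that incrementally grows a seen-set with a flatten followed by two whole-collection aggregate checks: a positivity predicate and a uniqueness test via set cardinality.
import Mathlib
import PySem

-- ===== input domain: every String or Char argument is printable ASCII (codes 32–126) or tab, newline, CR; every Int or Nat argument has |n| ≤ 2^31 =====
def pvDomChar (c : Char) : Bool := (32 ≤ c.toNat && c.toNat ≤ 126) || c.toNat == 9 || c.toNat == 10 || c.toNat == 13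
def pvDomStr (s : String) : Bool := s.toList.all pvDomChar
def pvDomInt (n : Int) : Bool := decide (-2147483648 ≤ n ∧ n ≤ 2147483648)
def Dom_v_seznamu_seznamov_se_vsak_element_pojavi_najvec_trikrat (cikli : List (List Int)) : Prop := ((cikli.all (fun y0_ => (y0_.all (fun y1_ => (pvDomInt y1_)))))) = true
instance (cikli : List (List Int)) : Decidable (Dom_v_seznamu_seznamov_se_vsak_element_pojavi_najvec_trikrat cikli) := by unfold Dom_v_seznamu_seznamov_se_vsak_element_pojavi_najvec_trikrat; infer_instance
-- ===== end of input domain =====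

-- B replaces A's interleaved early-return loop over a growing seen-set with a flatten
-- followed by two whole-collection checks (all positive; set size = list length): simpler decomposition, same cost.

-- ===== PORT A =====
-- inner 'for element in cikel' loop; 'none' = an early 'return False' was taken,
-- 'some s' = loop finished with seen-set s
def pvInnerA (seen : PySem.Set Int) : List Int → Option (PySem.Set Int)
  | [] => some seen
  | e :: rest =>
    if e ≤ 0 then none
    else if PySem.Set.contains seen e then none
    else pvInnerA (PySem.Set.add seen e) rest

-- outer 'for cikel in cikli' loop
def pvOuterA (seen : PySem.Set Int) : List (List Int) → Bool
  | [] => true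
  | c :: rest =>
    match pvInnerA seen c with
    | none => false
    | some s => pvOuterA s rest

def v_seznamu_seznamov_se_vsak_element_pojavi_najvec_trikrat (cikli : List (List Int)) : Bool :=
  pvOuterA PySem.Set.empty cikli

-- ===== PORT B =====
def v_seznamu_seznamov_se_vsak_element_pojavi_najvec_trikrat_alt (cikli : List (List Int)) : Bool :=
  let elements := cikli.flatMap (fun cikel => cikel)
  elements.all (fun e => decide (0 < e)) &&
    (PySem.Set.len (PySem.Set.ofList elements) == (elements.length : Int))

-- ===== PRECONDITION & SPEC =====
def Spec_v_seznamu_seznamov_se_vsak_element_pojavi_najvec_trikrat (cikli : List (List Int)) (out : Bool) : Prop := out = v_seznamu_seznamov_se_vsak_element_pojavi_najvec_trikrat_alt cikli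
instance (cikli : List (List Int)) (out : Bool) : Decidable (Spec_v_seznamu_seznamov_se_vsak_element_pojavi_najvec_trikrat cikli out) := by unfold Spec_v_seznamu_seznamov_se_vsak_element_pojavi_najvec_trikrat; infer_instance

-- ===== CLAIM (what is proved, stated in full; the proofs are below) =====
def Claim_equal_v_seznamu_seznamov_se_vsak_element_pojavi_najvec_trikrat : Prop := ∀ (cikli : List (List Int)), Dom_v_seznamu_seznamov_se_vsak_element_pojavi_najvec_trikrat cikli → Spec_v_seznamu_seznamov_se_vsak_element_pojavi_najvec_trikrat cikli (v_seznamu_seznamov_se_vsak_element_pojavi_najvec_trikrat cikli)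

-- ===== LEMMAS AND PROOFS =====

theorem pvInnerA_spec (c : List Int) (seen : PySem.Set Int) :
    pvInnerA seen c =
      if (c.Nodup ∧ ∀ e ∈ c, 0 < e ∧ e ∉ seen) then some (seen ++ c) else none := by
  induction c generalizing seen with
  | nil => simp [pvInnerA]
  | cons e rest ih =>
    simp only [pvInnerA]
    by_cases h1 : e ≤ 0
    · rw [if_pos h1, if_neg (fun h => absurd (h.2 e (List.mem_cons_self)).1 (by omega))]
    · rw [if_neg h1]
      by_cases h2 : e ∈ seen
      · rw [if_pos ((PySem.Set.contains_iff seen e).mpr h2),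
            if_neg (fun h => (h.2 e (List.mem_cons_self)).2 h2)]
      · rw [if_neg (fun hh => h2 ((PySem.Set.contains_iff seen e).mp hh)),
            ih, PySem.Set.add_of_not_mem h2,
            show (seen ++ [e]) ++ rest = seen ++ e :: rest by simp]
        refine if_congr ?_ rfl rfl
        constructor
        · rintro ⟨hn, hall⟩
          refine ⟨List.nodup_cons.mpr ⟨fun hx => (hall e hx).2 (by simp), hn⟩, ?_⟩
          intro x hx
          rcases List.mem_cons.mp hx with rfl | hx'
          · exact ⟨by omega, h2⟩
          · have := hall x hx'
            simp only [List.mem_append, List.mem_singleton] at this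
            exact ⟨this.1, fun hs => this.2 (Or.inl hs)⟩
        · rintro ⟨hn, hall⟩
          obtain ⟨hne, hn'⟩ := List.nodup_cons.mp hn
          refine ⟨hn', fun x hx => ?_⟩
          have := hall x (List.mem_cons_of_mem _ hx)
          refine ⟨this.1, ?_⟩
          simp only [List.mem_append, List.mem_singleton]
          rintro (hs | rfl)
          · exact this.2 hs
          · exact hne hx

theorem pvOuterA_spec (cikli : List (List Int)) (seen : PySem.Set Int) :
    pvOuterA seen cikli = true ↔
      ((cikli.flatMap (fun c => c)).Nodup ∧
       ∀ e ∈ cikli.flatMap (fun c => c), 0 < e ∧ e ∉ seen) := by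
  induction cikli generalizing seen with
  | nil => simp [pvOuterA]
  | cons c rest ih =>
    simp only [pvOuterA, pvInnerA_spec]
    by_cases h : c.Nodup ∧ ∀ e ∈ c, 0 < e ∧ e ∉ seen
    · rw [if_pos h]
      rw [ih]
      rw [show List.flatMap (fun c => c) (c :: rest) = c ++ List.flatMap (fun c => c) rest from by simp]
      obtain ⟨hnc, hpos⟩ := h
      constructor
      · rintro ⟨hn, hall⟩
        refine ⟨List.Nodup.append hnc hn (List.disjoint_left.mpr
          (by intro a ha hb; exact (hall a hb).2 (List.mem_append.mpr (Or.inr ha)))), ?_⟩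
        intro e he
        rcases List.mem_append.mp he with he | he
        · exact hpos e he
        · exact ⟨(hall e he).1, fun hs => (hall e he).2 (List.mem_append.mpr (Or.inl hs))⟩
      · rintro ⟨hn, hall⟩
        have hdisj := List.disjoint_of_nodup_append hn
        refine ⟨hn.of_append_right, fun e he => ?_⟩
        have hthis := hall e (List.mem_append.mpr (Or.inr he))
        refine ⟨hthis.1, ?_⟩
        intro hs
        rcases List.mem_append.mp hs with hs | hs
        · exact hthis.2 hs
        · exact List.disjoint_left.mp hdisj hs he
    · rw [if_neg h]
      simp only [Bool.false_eq_true, false_iff]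
      rintro ⟨hn, hall⟩
      apply h
      simp only [List.flatMap_cons, List.nodup_append] at hn
      exact ⟨hn.1, fun e he => hall e (by simp [he])⟩

theorem pvOfList_length_lt {xs : List Int} (h : ¬ xs.Nodup) :
    (PySem.Set.ofList xs).length < xs.length := by
  induction xs with
  | nil => simp at h
  | cons x t ih =>
    rw [PySem.Set.ofList_cons]
    simp only [List.length_cons]
    by_cases ht : t.Nodup
    · have hx : x ∈ t := by
        by_contra hx
        exact h (List.nodup_cons.mpr ⟨hx, ht⟩)
      have hx' : x ∈ PySem.Set.ofList t := (PySem.Set.mem_ofList t x).mpr hx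
      have hlt : (PySem.Set.discard (PySem.Set.ofList t) x).length < (PySem.Set.ofList t).length := by
        unfold PySem.Set.discard
        rw [List.length_filter_lt_length_iff_exists]
        exact ⟨x, hx', by simp⟩
      have := PySem.Set.length_ofList_le (xs := t)
      omega
    · have hlt := ih ht
      have hle : (PySem.Set.discard (PySem.Set.ofList t) x).length ≤ (PySem.Set.ofList t).length := by
        unfold PySem.Set.discard
        exact List.length_filter_le _ _
      omega

theorem pvOfList_length_iff (xs : List Int) :
    ((PySem.Set.ofList xs).length = xs.length) ↔ xs.Nodup := by
  constructor
  · intro h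
    by_contra hn
    exact absurd h (by have := pvOfList_length_lt hn; omega)
  · intro h
    rw [PySem.Set.ofList_eq_self_of_nodup xs h]

theorem pvAlt_iff (cikli : List (List Int)) :
    v_seznamu_seznamov_se_vsak_element_pojavi_najvec_trikrat_alt cikli = true ↔
      ((cikli.flatMap (fun c => c)).Nodup ∧
       ∀ e ∈ cikli.flatMap (fun c => c), 0 < e) := by
  unfold v_seznamu_seznamov_se_vsak_element_pojavi_najvec_trikrat_alt
  simp only [Bool.and_eq_true, List.all_eq_true, decide_eq_true_eq, beq_iff_eq,
    PySem.Set.len, Nat.cast_inj, pvOfList_length_iff]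
  tauto

-- ===== VERDICT (by name: the statement is the Claim_ definition above) =====
theorem v_seznamu_seznamov_se_vsak_element_pojavi_najvec_trikrat_spec : Claim_equal_v_seznamu_seznamov_se_vsak_element_pojavi_najvec_trikrat := by
  intro cikli _
  unfold Spec_v_seznamu_seznamov_se_vsak_element_pojavi_najvec_trikrat
  rw [Bool.eq_iff_iff]
  unfold v_seznamu_seznamov_se_vsak_element_pojavi_najvec_trikrat
  rw [pvOuterA_spec, pvAlt_iff]
  simp [PySem.Set.empty]
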